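-- pv_equiv track=rewrite | github.com/manav-saini/Cycle-accurate-simulator-for-5-stage-CPU | plot2.py | read_hit_and_miss
-- ===== SOURCE A (Python) =====
-- def read_hit_and_miss(lines, total_cycles):
--     hits = []
--     misses = []
--     clock_cycle = []
--     total_hits = []
--     total_misses = []
--
--     for line in lines:
--         if "CLOCK CYCLE: " in line:
--             cycle = int(line.split(" ")[2])
--         if "Hits: " in line:
--             index = line.split(" ")
--             hits.append(int(index[1]))
--             misses.append(int(index[3]))
--             clock_cycle.append(cycle)
--
--     for i in range(0, total_cycles + 1):
--         if i in clock_cycle: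
--             index = clock_cycle.index(i)
--             total_hits.append(hits[index])
--             total_misses.append(misses[index])
--         else:
--             total_hits.append(0)
--             total_misses.append(0)
--
--     return total_hits, total_misses, clock_cycle
-- ===== SOURCE B (Python) =====
-- def read_hit_and_miss(lines, total_cycles):
--     # Single parse pass collecting (cycle, hits, misses) triples, then
--     # preallocated arrays filled back-to-front by overwriting, so the
--     # FIRST occurrence of each cycle wins without any membership test.
--     triples = []
--     for line in lines:
--         if "CLOCK CYCLE: " in line:
--             cycle = int(line.split(" ")[2])
--         if "Hits: " in line:
--             parts = line.split(" ")
--             triples.append((cycle, int(parts[1]), int(parts[3])))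
--
--     n = total_cycles + 1
--     total_hits = [0] * n
--     total_misses = [0] * n
--     for c, h, m in reversed(triples):
--         if 0 <= c < n:
--             total_hits[c] = h
--             total_misses[c] = m
--     return total_hits, total_misses, [c for c, _, _ in triples]
-- ===== Notes on version B (the rewrite author's own statement) =====
-- stated objective: alternative
-- what changed: Instead of A's second loop that scans clock_cycle with `in` and list.index for every i in range(total_cycles+1), B collects (cycle,hits,misses) triples in one parse pass, preallocates [0]*(total_cycles+1) arrays and fills them by overwriting while iterating the triples back-to-front, so the first occurrence wins with no membership test or index scan at all.
import Mathlib
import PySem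

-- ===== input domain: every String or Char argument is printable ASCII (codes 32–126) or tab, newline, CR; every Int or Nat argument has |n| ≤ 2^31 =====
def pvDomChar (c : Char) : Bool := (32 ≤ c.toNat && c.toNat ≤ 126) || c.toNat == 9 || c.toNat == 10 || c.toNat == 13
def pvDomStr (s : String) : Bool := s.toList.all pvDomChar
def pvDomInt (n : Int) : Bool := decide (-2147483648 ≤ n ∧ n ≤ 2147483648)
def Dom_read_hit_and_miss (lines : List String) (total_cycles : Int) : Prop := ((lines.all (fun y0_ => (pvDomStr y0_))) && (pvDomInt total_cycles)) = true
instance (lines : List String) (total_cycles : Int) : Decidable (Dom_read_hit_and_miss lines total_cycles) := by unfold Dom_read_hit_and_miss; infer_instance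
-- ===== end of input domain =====

-- B replaces A's per-cycle `in`/`list.index` scans by preallocated arrays filled
-- back-to-front by overwriting (first occurrence wins, no membership test).

-- ===== PORT A =====
-- literal port of A: parsing loop body over state (hits, misses, clock_cycle, current cycle as
-- Option — the .getD 0 defaults are only reached outside Pre_, where Python raises)
def pvStepA (st : List Int × List Int × List Int × Option Int) (line : String) :
    List Int × List Int × List Int × Option Int :=
  let cyc := if PySem.Str.isIn "CLOCK CYCLE: " line
    then some ((PySem.Int.ofStr? (PySem.List.pyGetD ((PySem.Str.split? line " ").getD []) 2 "")).getD 0)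
    else st.2.2.2
  if PySem.Str.isIn "Hits: " line then
    let index := (PySem.Str.split? line " ").getD []
    (st.1 ++ [(PySem.Int.ofStr? (PySem.List.pyGetD index 1 "")).getD 0],
     st.2.1 ++ [(PySem.Int.ofStr? (PySem.List.pyGetD index 3 "")).getD 0],
     st.2.2.1 ++ [cyc.getD 0], cyc)
  else (st.1, st.2.1, st.2.2.1, cyc)

-- A's second loop: `for i in range(0, total_cycles + 1)` with `in` / `list.index` lookups
def read_hit_and_miss (lines : List String) (total_cycles : Int) : List Int × List Int × List Int :=
  let st := lines.foldl pvStepA ([], [], [], none)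
  let tot := (PySem.List.pyRange 0 (total_cycles + 1) 1).foldl (fun (p : List Int × List Int) i =>
    if st.2.2.1.contains i then
      let index : Nat := (PySem.List.index? st.2.2.1 i).getD 0
      (p.1 ++ [PySem.List.pyGetD st.1 (index : Int) 0],
       p.2 ++ [PySem.List.pyGetD st.2.1 (index : Int) 0])
    else (p.1 ++ [0], p.2 ++ [0])) ([], [])
  (tot.1, tot.2, st.2.2.1)

-- ===== PORT B =====
-- literal port of Source B: the parsing loop collects (cycle, hits, misses) triples
def pvParseB (st : List (Int × Int × Int) × Option Int) (line : String) :
    List (Int × Int × Int) × Option Int :=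
  let cyc := if PySem.Str.isIn "CLOCK CYCLE: " line
    then some ((PySem.Int.ofStr? (PySem.List.pyGetD ((PySem.Str.split? line " ").getD []) 2 "")).getD 0)
    else st.2
  if PySem.Str.isIn "Hits: " line then
    let parts := (PySem.Str.split? line " ").getD []
    (st.1 ++ [(cyc.getD 0,
               (PySem.Int.ofStr? (PySem.List.pyGetD parts 1 "")).getD 0,
               (PySem.Int.ofStr? (PySem.List.pyGetD parts 3 "")).getD 0)], cyc)
  else (st.1, cyc)

-- `total_hits[c] = h; total_misses[c] = m` guarded by `0 <= c < n` (list mutation = List.set)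
def pvFillB (n : Int) (p : List Int × List Int) (t : Int × Int × Int) : List Int × List Int :=
  if 0 ≤ t.1 ∧ t.1 < n then (p.1.set t.1.toNat t.2.1, p.2.set t.1.toNat t.2.2) else p

def read_hit_and_miss_alt (lines : List String) (total_cycles : Int) : List Int × List Int × List Int :=
  let st := lines.foldl pvParseB ([], none)
  let n := total_cycles + 1
  let tot := st.1.reverse.foldl (pvFillB n)
    (List.replicate n.toNat 0, List.replicate n.toNat 0)
  (tot.1, tot.2, st.1.map (fun t => t.1))

-- ===== PRECONDITION & SPEC =====
-- Pre_ = exactly the inputs on which Python A returns: every "CLOCK CYCLE: " line parses an int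
-- at token 2, every "Hits: " line parses ints at tokens 1 and 3 (otherwise IndexError/ValueError),
-- and no "Hits: " line precedes every "CLOCK CYCLE: " line (otherwise NameError on `cycle`).
def Pre_read_hit_and_miss (lines : List String) (total_cycles : Int) : Prop :=
  (∀ line ∈ lines,
     (PySem.Str.isIn "CLOCK CYCLE: " line = true →
       (PySem.Int.ofStr? (PySem.List.pyGetD ((PySem.Str.split? line " ").getD []) 2 "")).isSome = true) ∧
     (PySem.Str.isIn "Hits: " line = true →
       (PySem.Int.ofStr? (PySem.List.pyGetD ((PySem.Str.split? line " ").getD []) 1 "")).isSome = true ∧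
       (PySem.Int.ofStr? (PySem.List.pyGetD ((PySem.Str.split? line " ").getD []) 3 "")).isSome = true)) ∧
  (∀ i : Nat, i < lines.length → PySem.Str.isIn "Hits: " (lines.getD i "") = true →
     ∃ j : Nat, j ≤ i ∧ PySem.Str.isIn "CLOCK CYCLE: " (lines.getD j "") = true)

instance (lines : List String) (total_cycles : Int) : Decidable (Pre_read_hit_and_miss lines total_cycles) := by
  unfold Pre_read_hit_and_miss; infer_instance

def pvWitness_read_hit_and_miss : List String × Int :=
  (["CLOCK CYCLE: 1", "Hits: 2 Misses: 3"], 2)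

def Spec_read_hit_and_miss (lines : List String) (total_cycles : Int) (out : List Int × List Int × List Int) : Prop := out = read_hit_and_miss_alt lines total_cycles
instance (lines : List String) (total_cycles : Int) (out : List Int × List Int × List Int) : Decidable (Spec_read_hit_and_miss lines total_cycles out) := by unfold Spec_read_hit_and_miss; infer_instance

-- ===== CLAIM (what is proved, stated in full; the proofs are below) =====
def Claim_equal_read_hit_and_miss : Prop := ∀ (lines : List String) (total_cycles : Int), Dom_read_hit_and_miss lines total_cycles → Pre_read_hit_and_miss lines total_cycles → Spec_read_hit_and_miss lines total_cycles (read_hit_and_miss lines total_cycles)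

-- ===== LEMMAS AND PROOFS =====

-- the (hits, misses) pair at the FIRST triple whose cycle is i, else (0, 0)
def pvFirst (ts : List (Int × Int × Int)) (i : Int) : Int × Int :=
  match ts with
  | [] => (0, 0)
  | t :: r => if t.1 = i then (t.2.1, t.2.2) else pvFirst r i

-- simulation: B's triples are A's three parallel lists, zipped
def pvRel (a : List Int × List Int × List Int × Option Int)
    (b : List (Int × Int × Int) × Option Int) : Prop :=
  a.1 = b.1.map (fun t => t.2.1) ∧ a.2.1 = b.1.map (fun t => t.2.2) ∧
  a.2.2.1 = b.1.map (fun t => t.1) ∧ a.2.2.2 = b.2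

theorem pvStep_rel (a : List Int × List Int × List Int × Option Int)
    (b : List (Int × Int × Int) × Option Int) (line : String)
    (h : pvRel a b) : pvRel (pvStepA a line) (pvParseB b line) := by
  obtain ⟨h1, h2, h3, h4⟩ := h
  unfold pvRel pvStepA pvParseB
  split_ifs <;> simp [h1, h2, h3, h4]

theorem pvFold_rel (lines : List String) :
    ∀ (a : List Int × List Int × List Int × Option Int)
      (b : List (Int × Int × Int) × Option Int),
    pvRel a b → pvRel (lines.foldl pvStepA a) (lines.foldl pvParseB b) := by
  induction lines with
  | nil => exact fun a b h => h
  | cons line rest ih => exact fun a b h => ih _ _ (pvStep_rel a b line h)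

-- A's per-i lookup over the three parallel lists computes pvFirst
theorem pvLookupA (ts : List (Int × Int × Int)) (i : Int) :
    (if (ts.map (fun t => t.1)).contains i then
      (PySem.List.pyGetD (ts.map (fun t => t.2.1)) (((PySem.List.index? (ts.map (fun t => t.1)) i).getD 0 : Nat) : Int) 0,
       PySem.List.pyGetD (ts.map (fun t => t.2.2)) (((PySem.List.index? (ts.map (fun t => t.1)) i).getD 0 : Nat) : Int) 0)
     else (0, 0)) = pvFirst ts i := by
  induction ts with
  | nil => simp [pvFirst]
  | cons t r ih =>
    by_cases hti : t.1 = i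
    · have hidx : PySem.List.index? ((t :: r).map (fun t => t.1)) i = some 0 := by
        rw [List.map_cons, hti]; exact PySem.List.index?_cons_self _ _
      have hcont : ((t :: r).map (fun t => t.1)).contains i = true := by
        simp [List.contains_eq_mem, hti.symm]
      rw [if_pos hcont, hidx]
      simp [pvFirst, hti, PySem.List.pyGetD_natCast]
    · have hstep : PySem.List.index? ((t :: r).map (fun t => t.1)) i =
          Option.map (fun x => x + 1) (PySem.List.index? (r.map (fun t => t.1)) i) := by
        rw [List.map_cons]; exact PySem.List.index?_cons_of_ne _ hti
      by_cases hm : i ∈ r.map (fun t => t.1)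
      · obtain ⟨j, hj⟩ := Option.isSome_iff_exists.1 ((PySem.List.index?_isSome_iff _ _).2 hm)
        have hcont : ((t :: r).map (fun t => t.1)).contains i = true := by
          simp [List.contains_eq_mem, hm]
        have hcont' : (r.map (fun t => t.1)).contains i = true := by
          simp [List.contains_eq_mem, hm]
        rw [if_pos hcont, hstep, hj]
        have hih := ih
        rw [if_pos hcont', hj] at hih
        simp only [Option.map_some, Option.getD_some, PySem.List.pyGetD_natCast] at hih ⊢
        simp [pvFirst, hti, ← hih, List.getD_cons_succ]
      · have hcont : ¬ ((t :: r).map (fun t => t.1)).contains i = true := by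
          simp only [List.map_cons, List.contains_eq_mem, List.mem_cons, decide_eq_true_eq, not_or]
          exact ⟨fun h => hti h.symm, hm⟩
        have hcont' : ¬ (r.map (fun t => t.1)).contains i = true := by
          simp [List.contains_eq_mem, hm]
        rw [if_neg hcont]
        have hih := ih
        rw [if_neg hcont'] at hih
        simp [pvFirst, hti, ← hih]

-- B's back-to-front overwrite pass realises pvFirst pointwise
theorem pvFill_spec (n : Int) (ts : List (Int × Int × Int)) :
    (ts.foldr (fun t p => pvFillB n p t) (List.replicate n.toNat 0, List.replicate n.toNat 0)).1.length = n.toNat ∧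
    (ts.foldr (fun t p => pvFillB n p t) (List.replicate n.toNat 0, List.replicate n.toNat 0)).2.length = n.toNat ∧
    ∀ k : Nat, k < n.toNat →
      (ts.foldr (fun t p => pvFillB n p t) (List.replicate n.toNat 0, List.replicate n.toNat 0)).1.getD k 0 = (pvFirst ts (k : Int)).1 ∧
      (ts.foldr (fun t p => pvFillB n p t) (List.replicate n.toNat 0, List.replicate n.toNat 0)).2.getD k 0 = (pvFirst ts (k : Int)).2 := by
  induction ts with
  | nil =>
    refine ⟨by simp, by simp, fun k hk => ?_⟩
    constructor <;> simp [pvFirst, List.getD_eq_getElem, hk]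
  | cons t r ih =>
    obtain ⟨hl1, hl2, hget⟩ := ih
    simp only [List.foldr_cons]
    set R := r.foldr (fun t p => pvFillB n p t) (List.replicate n.toNat 0, List.replicate n.toNat 0) with hR
    by_cases hg : 0 ≤ t.1 ∧ t.1 < n
    · rw [pvFillB, if_pos hg]
      refine ⟨by simp [hl1], by simp [hl2], fun k hk => ?_⟩
      obtain ⟨hgk1, hgk2⟩ := hget k hk
      by_cases heq : t.1 = (k : Int)
      · have hkn : t.1.toNat = k := by omega
        constructor
        · rw [List.getD_eq_getElem _ _ (by rw [List.length_set, hl1]; exact hk),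
            List.getElem_set, if_pos hkn]
          simp [pvFirst, heq]
        · rw [List.getD_eq_getElem _ _ (by rw [List.length_set, hl2]; exact hk),
            List.getElem_set, if_pos hkn]
          simp [pvFirst, heq]
      · have hkn : t.1.toNat ≠ k := by omega
        constructor
        · rw [List.getD_eq_getElem _ _ (by rw [List.length_set, hl1]; exact hk),
            List.getElem_set, if_neg hkn,
            ← List.getD_eq_getElem _ 0 (by rw [hl1]; exact hk), hgk1]
          simp [pvFirst, heq]
        · rw [List.getD_eq_getElem _ _ (by rw [List.length_set, hl2]; exact hk),
            List.getElem_set, if_neg hkn,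
            ← List.getD_eq_getElem _ 0 (by rw [hl2]; exact hk), hgk2]
          simp [pvFirst, heq]
    · rw [pvFillB, if_neg hg]
      refine ⟨hl1, hl2, fun k hk => ?_⟩
      have heq : t.1 ≠ (k : Int) := by omega
      obtain ⟨hgk1, hgk2⟩ := hget k hk
      exact ⟨by rw [hgk1]; simp [pvFirst, heq], by rw [hgk2]; simp [pvFirst, heq]⟩

-- a fold appending one element to each component per step is a pair of maps
theorem pvFoldPair (F G : Int → Int) :
    ∀ (l : List Int) (acc1 acc2 : List Int),
    l.foldl (fun (p : List Int × List Int) i => (p.1 ++ [F i], p.2 ++ [G i])) (acc1, acc2) =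
      (acc1 ++ l.map F, acc2 ++ l.map G) := by
  intro l
  induction l with
  | nil => simp
  | cons x xs ih => intro acc1 acc2; simp [ih]

theorem read_hit_and_miss_spec : Claim_equal_read_hit_and_miss := by
  unfold Claim_equal_read_hit_and_miss
  intro lines total_cycles _ _
  unfold Spec_read_hit_and_miss read_hit_and_miss read_hit_and_miss_alt
  dsimp only
  have hrel : pvRel (lines.foldl pvStepA ([], [], [], none))
      (lines.foldl pvParseB ([], none)) :=
    pvFold_rel lines _ _ ⟨rfl, rfl, rfl, rfl⟩
  set stA := lines.foldl pvStepA ([], [], [], none) with hstA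
  set stB := lines.foldl pvParseB ([], none) with hstB
  obtain ⟨h1, h2, h3, _⟩ := hrel
  set N := total_cycles + 1 with hN
  -- A's second loop body appends pvFirst of the triples at each i
  have hbody : (fun (p : List Int × List Int) i =>
      if stA.2.2.1.contains i then
        (p.1 ++ [PySem.List.pyGetD stA.1 (((PySem.List.index? stA.2.2.1 i).getD 0 : Nat) : Int) 0],
         p.2 ++ [PySem.List.pyGetD stA.2.1 (((PySem.List.index? stA.2.2.1 i).getD 0 : Nat) : Int) 0])
      else (p.1 ++ [0], p.2 ++ [0])) =
      (fun (p : List Int × List Int) i =>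
        (p.1 ++ [(pvFirst stB.1 i).1], p.2 ++ [(pvFirst stB.1 i).2])) := by
    funext p i
    rw [h1, h2, h3, ← pvLookupA stB.1 i]
    by_cases hm : (stB.1.map (fun t => t.1)).contains i = true
    · simp only [if_pos hm]
    · simp only [if_neg hm]
  rw [hbody, pvFoldPair]
  -- B's arrays realise the same maps
  have hfoldr : stB.1.reverse.foldl (pvFillB N) (List.replicate N.toNat 0, List.replicate N.toNat 0) =
      stB.1.foldr (fun t p => pvFillB N p t) (List.replicate N.toNat 0, List.replicate N.toNat 0) :=
    List.foldl_reverse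
  rw [hfoldr]
  obtain ⟨hl1, hl2, hget⟩ := pvFill_spec N stB.1
  refine Prod.ext ?_ (Prod.ext ?_ h3)
  · apply List.ext_getElem
    · simp [PySem.List.length_pyRange_one, hl1]
    · intro k hk1 hk2
      have hkn : k < N.toNat := by rw [← hl1]; exact hk2
      simp only [List.nil_append, List.getElem_map, PySem.List.getElem_pyRange_one]
      rw [← List.getD_eq_getElem _ 0 hk2, (hget k hkn).1]
      simp
  · apply List.ext_getElem
    · simp [PySem.List.length_pyRange_one, hl2]
    · intro k hk1 hk2
      have hkn : k < N.toNat := by rw [← hl2]; exact hk2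
      simp only [List.nil_append, List.getElem_map, PySem.List.getElem_pyRange_one]
      rw [← List.getD_eq_getElem _ 0 hk2, (hget k hkn).2]
      simp
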